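-- pv_equiv track=rewrite | github.com/KinnearM/Advent_2025 | day9WIP.py | find_greens
-- ===== SOURCE A (Python) =====
-- def find_greens(clean_data):
--
--     vert_limits = {}
--     hor_limits = {}
--
--     for x, y in clean_data:
--
--         if x not in vert_limits:
--             vert_limits[x] = [y, y]
--         else:
--             if y < vert_limits[x][0]: vert_limits[x][0] = y
--             if y > vert_limits[x][1]: vert_limits[x][1] = y
--
--         if y not in hor_limits:
--             hor_limits[y] = [x, x]
--         else:
--             if x < hor_limits[y][0]: hor_limits[y][0] = x
--             if x > hor_limits[y][1]: hor_limits[y][1] = x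
--
--     return vert_limits, hor_limits
-- ===== SOURCE B (Python) =====
-- def find_greens(clean_data):
--     cols = {}
--     rows = {}
--     for x, y in clean_data:
--         cols.setdefault(x, []).append(y)
--         rows.setdefault(y, []).append(x)
--     vert_limits = {k: [min(vs), max(vs)] for k, vs in cols.items()}
--     hor_limits = {k: [min(vs), max(vs)] for k, vs in rows.items()}
--     return vert_limits, hor_limits
-- ===== Notes on version B (the rewrite author's own statement) =====
-- stated objective: simpler
-- what changed: Replaces A's incremental per-key [lo,hi] mutation with a group-then-reduce decomposition: one pass groups y's by x (and x's by y) into lists, then each group is mapped to [min(group), max(group)].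
import Mathlib
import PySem

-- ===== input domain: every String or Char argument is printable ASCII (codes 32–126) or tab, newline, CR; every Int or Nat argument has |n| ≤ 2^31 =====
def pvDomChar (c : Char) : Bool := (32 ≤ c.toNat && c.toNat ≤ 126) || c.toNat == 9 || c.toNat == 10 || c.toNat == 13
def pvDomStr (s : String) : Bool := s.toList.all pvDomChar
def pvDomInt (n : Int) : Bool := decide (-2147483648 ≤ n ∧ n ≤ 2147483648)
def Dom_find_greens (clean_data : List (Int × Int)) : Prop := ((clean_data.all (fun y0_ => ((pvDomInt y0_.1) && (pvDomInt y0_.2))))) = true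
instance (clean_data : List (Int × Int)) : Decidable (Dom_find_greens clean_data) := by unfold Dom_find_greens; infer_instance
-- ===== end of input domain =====

-- B replaces A's incremental per-key [lo,hi] mutation by a group-then-reduce pass
-- (group values per key, then map each group to [min, max]); objective: simpler.

-- ===== PORT A =====
-- one loop body of A for one dict: if key absent insert [v,v], else lower/raise the
-- stored bounds in place (list element assignment ported as List.set; exact, since the
-- stored lists always have length 2 here)
def find_greens_step (d : PySem.Dict Int (List Int)) (k v : Int) : PySem.Dict Int (List Int) :=
  if d.contains k = false then
    d.insert k [v, v]
  else
    let cur := d.getD k []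
    let cur1 := if v < cur.getD 0 0 then cur.set 0 v else cur
    let cur2 := if v > cur1.getD 1 0 then cur1.set 1 v else cur1
    d.insert k cur2

def find_greens (clean_data : List (Int × Int)) : (List (Int × List Int)) × (List (Int × List Int)) :=
  let st := clean_data.foldl
    (fun (st : PySem.Dict Int (List Int) × PySem.Dict Int (List Int)) p =>
      (find_greens_step st.1 p.1 p.2, find_greens_step st.2 p.2 p.1))
    (PySem.Dict.empty, PySem.Dict.empty)
  (st.1.items, st.2.items)

-- ===== PORT B =====
-- [min(vs), max(vs)] of a group; groups are nonempty by construction, so the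
-- .getD 0 default of min?/max? is never used
def find_greens_mm (vs : List Int) : List Int :=
  [(PySem.List.min? vs (fun a => a)).getD 0, (PySem.List.max? vs (fun a => a)).getD 0]

-- cols.setdefault(x, []).append(y) ported as Dict.modify x [] (· ++ [y])
def find_greens_alt (clean_data : List (Int × Int)) : (List (Int × List Int)) × (List (Int × List Int)) :=
  let cols := clean_data.foldl (fun d p => d.modify p.1 [] (· ++ [p.2])) PySem.Dict.empty
  let rows := clean_data.foldl (fun d p => d.modify p.2 [] (· ++ [p.1])) PySem.Dict.empty
  (cols.items.map (fun p => (p.1, find_greens_mm p.2)),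
   rows.items.map (fun p => (p.1, find_greens_mm p.2)))

-- ===== PRECONDITION & SPEC =====
def Spec_find_greens (clean_data : List (Int × Int)) (out : (List (Int × List Int)) × (List (Int × List Int))) : Prop := out = find_greens_alt clean_data
instance (clean_data : List (Int × Int)) (out : (List (Int × List Int)) × (List (Int × List Int))) : Decidable (Spec_find_greens clean_data out) := by unfold Spec_find_greens; infer_instance

-- ===== CLAIM (what is proved, stated in full; the proofs are below) =====
def Claim_equal_find_greens : Prop := ∀ (clean_data : List (Int × Int)), Dom_find_greens clean_data → Spec_find_greens clean_data (find_greens clean_data)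

-- ===== LEMMAS AND PROOFS =====

-- A's dict is B's group dict with each group replaced by its [min, max]
def fgMM (g : PySem.Dict Int (List Int)) : PySem.Dict Int (List Int) :=
  PySem.Dict.mk (g.items.map (fun p => (p.1, find_greens_mm p.2)))

lemma fg_contains_mm (g : PySem.Dict Int (List Int)) (k : Int) :
    (fgMM g).contains k = g.contains k := by
  simp [fgMM, PySem.Dict.contains, List.any_map, Function.comp_def]

lemma fg_get?_mm (g : PySem.Dict Int (List Int)) (k : Int) :
    (fgMM g).get? k = (g.get? k).map find_greens_mm := by
  simp only [fgMM, PySem.Dict.get?, List.find?_map]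
  rcases h : List.find? ((fun p => p.1 == k) ∘ fun p => (p.1, find_greens_mm p.2)) g.items with _ | p
  · have : List.find? (fun p => p.1 == k) g.items = none := by
      simpa [Function.comp_def] using h
    simp [this, h]
  · have : List.find? (fun p => p.1 == k) g.items = some p := by
      simpa [Function.comp_def] using h
    simp [this, h]

-- inserting the reduced group = reducing after inserting the group
lemma fg_insert_mm (g : PySem.Dict Int (List Int)) (k : Int) (vs : List Int) :
    (fgMM g).insert k (find_greens_mm vs) = fgMM (g.insert k vs) := by
  apply PySem.Dict.ext
  show ((fgMM g).insert k (find_greens_mm vs)).items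
      = List.map (fun p => (p.1, find_greens_mm p.2)) (g.insert k vs).items
  by_cases h : g.contains k = true
  · rw [PySem.Dict.items_insert_of_contains _ _ h,
        PySem.Dict.items_insert_of_contains _ _ (show (fgMM g).contains k = true by
          rw [fg_contains_mm]; exact h)]
    show List.map _ (List.map _ g.items) = List.map _ (List.map _ g.items)
    simp only [List.map_map]
    refine List.map_congr_left (fun p hp => ?_)
    by_cases hpk : p.1 = k <;> simp [hpk]
  · rw [Bool.not_eq_true] at h
    rw [PySem.Dict.items_insert_of_not_contains _ _ h,
        PySem.Dict.items_insert_of_not_contains _ _ (show (fgMM g).contains k = false by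
          rw [fg_contains_mm]; exact h)]
    simp [fgMM]

lemma fg_mn_append (w : Int) (t : List Int) (v : Int) :
    (PySem.List.min? ((w :: t) ++ [v]) (fun a => a)).getD 0
      = (if v < (PySem.List.min? (w :: t) (fun a => a)).getD 0 then v
         else (PySem.List.min? (w :: t) (fun a => a)).getD 0) := by
  rw [show (w :: t) ++ [v] = w :: (t ++ [v]) from rfl,
      PySem.List.min?_id_cons, PySem.List.min?_id_cons]
  simp [List.foldl_append, min_def]
  omega

lemma fg_mx_append (w : Int) (t : List Int) (v : Int) :
    (PySem.List.max? ((w :: t) ++ [v]) (fun a => a)).getD 0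
      = (if v > (PySem.List.max? (w :: t) (fun a => a)).getD 0 then v
         else (PySem.List.max? (w :: t) (fun a => a)).getD 0) := by
  rw [show (w :: t) ++ [v] = w :: (t ++ [v]) from rfl,
      PySem.List.max?_id_cons, PySem.List.max?_id_cons]
  simp [List.foldl_append, max_def]
  omega

-- A's two conditional element assignments on a 2-element list, in closed form
lemma fg_set2 (a b v : Int) :
    (if v > (if v < ([a, b] : List Int).getD 0 0 then ([a, b] : List Int).set 0 v
             else ([a, b] : List Int)).getD 1 0 then
       (if v < ([a, b] : List Int).getD 0 0 then ([a, b] : List Int).set 0 v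
        else ([a, b] : List Int)).set 1 v
     else
       (if v < ([a, b] : List Int).getD 0 0 then ([a, b] : List Int).set 0 v
        else ([a, b] : List Int)))
    = [if v < a then v else a, if v > b then v else b] := by
  by_cases h1 : v < a <;> by_cases h2 : v > b <;> simp [h1, h2]

-- the key step: one iteration of A on the reduced dict = reduce of one iteration of B
lemma fg_step_mm (g : PySem.Dict Int (List Int)) (hne : ∀ p ∈ g.items, p.2 ≠ [])
    (k v : Int) :
    find_greens_step (fgMM g) k v = fgMM (g.modify k [] (· ++ [v])) := by
  rcases h : g.contains k with _ | _
  · -- fresh key: insert [v, v] = reduce of the one-element group [v]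
    have hget : g.getD k [] = [] := PySem.Dict.getD_of_not_contains g [] h
    have h' : (fgMM g).contains k = false := by rw [fg_contains_mm]; exact h
    rw [PySem.Dict.modify, hget]
    simp only [find_greens_step, h', List.nil_append]
    rw [show ([v, v] : List Int) = find_greens_mm [v] from rfl, fg_insert_mm]
    simp
  · -- existing key
    obtain ⟨vs, hvs⟩ : ∃ vs, g.get? k = some vs := by
      rcases h' : g.get? k with _ | vs
      · rw [PySem.Dict.contains_eq_isSome_get?, h'] at h; simp at h
      · exact ⟨vs, rfl⟩
    have hmem : (k, vs) ∈ g.items := PySem.Dict.mem_items_of_get?_eq_some g hvs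
    obtain ⟨w, t, rfl⟩ : ∃ w t, vs = w :: t := by
      rcases vs with _ | ⟨w, t⟩
      · exact absurd rfl (hne _ hmem)
      · exact ⟨w, t, rfl⟩
    have h' : (fgMM g).contains k = true := by rw [fg_contains_mm]; exact h
    have hcur : (fgMM g).getD k []
        = [(PySem.List.min? (w :: t) (fun a => a)).getD 0,
           (PySem.List.max? (w :: t) (fun a => a)).getD 0] := by
      simp [PySem.Dict.getD_eq_get?_getD, fg_get?_mm, hvs, find_greens_mm]
    rw [PySem.Dict.modify, PySem.Dict.getD_eq_get?_getD, hvs, Option.getD_some]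
    simp only [find_greens_step, h', Bool.true_eq_false, if_false, hcur, fg_set2]
    rw [show [if v < (PySem.List.min? (w :: t) (fun a => a)).getD 0 then v
                else (PySem.List.min? (w :: t) (fun a => a)).getD 0,
              if v > (PySem.List.max? (w :: t) (fun a => a)).getD 0 then v
                else (PySem.List.max? (w :: t) (fun a => a)).getD 0]
          = find_greens_mm ((w :: t) ++ [v]) by
        simp only [find_greens_mm, fg_mn_append, fg_mx_append]]
    exact fg_insert_mm g k ((w :: t) ++ [v])

lemma fg_hne_modify (g : PySem.Dict Int (List Int)) (hne : ∀ p ∈ g.items, p.2 ≠ [])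
    (k v : Int) : ∀ p ∈ (g.modify k [] (· ++ [v])).items, p.2 ≠ [] := by
  intro p hp
  rw [PySem.Dict.modify] at hp
  rcases (PySem.Dict.mem_items_insert _ _ _ _).mp hp with rfl | ⟨hp', _⟩
  · simp
  · exact hne _ hp'

-- the whole loop, generic in which pair component is the key
lemma fg_loop (kf vf : Int × Int → Int) :
    ∀ (l : List (Int × Int)) (g : PySem.Dict Int (List Int)),
      (∀ p ∈ g.items, p.2 ≠ []) →
      l.foldl (fun d p => find_greens_step d (kf p) (vf p)) (fgMM g)
        = fgMM (l.foldl (fun d p => d.modify (kf p) [] (· ++ [vf p])) g) := by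
  intro l
  induction l with
  | nil => intro g _; rfl
  | cons p t ih =>
    intro g hne
    simp only [List.foldl_cons, fg_step_mm g hne (kf p) (vf p)]
    exact ih _ (fg_hne_modify g hne (kf p) (vf p))

lemma fg_loop_fst (l : List (Int × Int)) :
    l.foldl (fun d p => find_greens_step d p.1 p.2) PySem.Dict.empty
      = fgMM (l.foldl (fun d p => d.modify p.1 [] (· ++ [p.2])) PySem.Dict.empty) := by
  simpa using fg_loop (fun p => p.1) (fun p => p.2) l PySem.Dict.empty (by simp [PySem.Dict.empty])

lemma fg_loop_snd (l : List (Int × Int)) :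
    l.foldl (fun d p => find_greens_step d p.2 p.1) PySem.Dict.empty
      = fgMM (l.foldl (fun d p => d.modify p.2 [] (· ++ [p.1])) PySem.Dict.empty) := by
  simpa using fg_loop (fun p => p.2) (fun p => p.1) l PySem.Dict.empty (by simp [PySem.Dict.empty])

lemma fg_pair (l : List (Int × Int)) (a b : PySem.Dict Int (List Int)) :
    List.foldl (fun st p => (find_greens_step st.1 p.1 p.2, find_greens_step st.2 p.2 p.1)) (a, b) l
      = (List.foldl (fun d p => find_greens_step d p.1 p.2) a l,
         List.foldl (fun d p => find_greens_step d p.2 p.1) b l) := by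
  induction l generalizing a b with
  | nil => rfl
  | cons p t ih => simp only [List.foldl_cons]; exact ih _ _

-- ===== VERDICT (by name: the statement is the Claim_ definition above) =====
theorem find_greens_spec : Claim_equal_find_greens := by
  intro clean_data _
  show (find_greens clean_data) = find_greens_alt clean_data
  simp only [find_greens, find_greens_alt]
  rw [fg_pair, fg_loop_fst, fg_loop_snd]
  rfl
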